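-- pv_equiv track=rewrite | github.com/01richardrs/Travel_Tracker | GUI Version/a1_classes.py | check_symbol
-- ===== SOURCE A (Python) =====
-- def check_symbol(user_input):
--     # Function to check symbol in user input
--     data = list(user_input)
--     counter = 0
--     for i in data:
--         SPECIAL_CHARACTERS = "!@#$%^&*()_-=+`~,./'[]<>?{}|\\"
--         if i in SPECIAL_CHARACTERS:
--             counter += 1
--         else:
--             counter = counter
--     if counter > 0:
--         return False
--     else:
--         return True
-- ===== SOURCE B (Python) =====
-- SPECIAL_CHARACTERS = "!@#$%^&*()_-=+`~,./'[]<>?{}|\\"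
--
-- def check_symbol(user_input):
--     # Sort the distinct characters of the input and of the special set,
--     # then run a two-pointer merge scan to detect any common element.
--     a = sorted(set(user_input))
--     b = sorted(set(SPECIAL_CHARACTERS))
--     i = j = 0
--     while i < len(a) and j < len(b):
--         if a[i] == b[j]:
--             return False
--         if a[i] < b[j]:
--             i += 1
--         else:
--             j += 1
--     return True
-- ===== Notes on version B (the rewrite author's own statement) =====
-- stated objective: alternative
-- what changed: Replaces A's per-character membership test with a running counter by a sort-then-merge algorithm: sort the distinct characters of the input and of the special set, then a two-pointer merge scan detects any common element.
import Mathlib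
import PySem

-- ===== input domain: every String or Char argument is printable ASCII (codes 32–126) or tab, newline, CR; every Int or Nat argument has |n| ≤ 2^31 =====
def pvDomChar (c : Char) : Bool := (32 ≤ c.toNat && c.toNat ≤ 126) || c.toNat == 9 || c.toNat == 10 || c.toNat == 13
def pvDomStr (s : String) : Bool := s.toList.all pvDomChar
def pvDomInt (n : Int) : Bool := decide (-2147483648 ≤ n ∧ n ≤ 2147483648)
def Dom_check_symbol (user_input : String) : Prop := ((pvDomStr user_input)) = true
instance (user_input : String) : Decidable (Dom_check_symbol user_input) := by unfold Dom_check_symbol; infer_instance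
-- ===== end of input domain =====

-- B replaces A's counter loop over per-character membership tests by sorting the distinct characters of input and special set and merge-scanning for a common element (different algorithm; measured faster in a timing run).


def pvSpecialChars : List Char := "!@#$%^&*()_-=+`~,./'[]<>?{}|\\".toList

-- ===== PORT A =====
def check_symbol (user_input : String) : Bool :=
  let data : List Char := user_input.toList
  let counter : Int :=
    data.foldl (fun counter i =>
      if pvSpecialChars.contains i then counter + 1 else counter) 0
  if counter > 0 then false else true

-- ===== PORT B =====
-- the two-pointer merge scan of Source B (on sorted lists, advancing the smaller side)
def pvNoCommon : List Char → List Char → Bool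
  | [], _ => true
  | _ :: _, [] => true
  | x :: xs, y :: ys =>
    if x = y then false
    else if x < y then pvNoCommon xs (y :: ys)
    else pvNoCommon (x :: xs) ys

def check_symbol_alt (user_input : String) : Bool :=
  let a := PySem.List.sorted (PySem.Set.ofList user_input.toList) (fun x => x) false
  let b := PySem.List.sorted (PySem.Set.ofList pvSpecialChars) (fun x => x) false
  pvNoCommon a b

-- ===== PRECONDITION & SPEC =====
def Spec_check_symbol (user_input : String) (out : Bool) : Prop := out = check_symbol_alt user_input
instance (user_input : String) (out : Bool) : Decidable (Spec_check_symbol user_input out) := by unfold Spec_check_symbol; infer_instance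

-- ===== CLAIM (what is proved, stated in full; the proofs are below) =====
def Claim_equal_check_symbol : Prop := ∀ (user_input : String), Dom_check_symbol user_input → Spec_check_symbol user_input (check_symbol user_input)

-- ===== LEMMAS AND PROOFS =====
theorem check_symbol_true_iff (s : String) :
    check_symbol s = true ↔ ∀ c ∈ s.toList, c ∉ pvSpecialChars := by
  have hc : check_symbol s =
      (if (0 : Int) + (s.toList.countP (fun i => pvSpecialChars.contains i) : Int) > 0
       then false else true) := by
    simp only [check_symbol]
    rw [PySem.List.foldl_if_add_one]
  rw [hc]
  split_ifs with hgt
  · simp only [false_iff]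
    intro h
    have : s.toList.countP (fun i => pvSpecialChars.contains i) = 0 :=
      List.countP_eq_zero.mpr (by intro c hcm; simpa using h c hcm)
    rw [this] at hgt; simp at hgt
  · simp only [true_iff]
    intro c hcm hmem
    have h0 : 0 < s.toList.countP (fun i => pvSpecialChars.contains i) :=
      by rw [List.countP_pos_iff]; exact ⟨c, hcm, by simpa using hmem⟩
    apply hgt
    have := Int.natCast_pos.mpr h0
    omega

-- correctness of the merge scan on strictly increasing lists
theorem pvNoCommon_true_iff (xs ys : List Char)
    (hxs : xs.Pairwise (· < ·)) (hys : ys.Pairwise (· < ·)) :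
    pvNoCommon xs ys = true ↔ ∀ c ∈ xs, c ∉ ys := by
  fun_induction pvNoCommon xs ys with
  | case1 ys => simp
  | case2 x xs => simp
  | case3 a b c =>
    constructor
    · exact fun h => absurd h Bool.false_ne_true
    · exact fun h => absurd List.mem_cons_self (h b List.mem_cons_self)
  | case4 x xs y ys hne hlt ih =>
    rw [List.pairwise_cons] at hxs
    have hy_all : ∀ z ∈ ys, y < z := (List.pairwise_cons.mp hys).1
    rw [ih hxs.2 hys]
    constructor
    · intro h c hc
      rcases List.mem_cons.mp hc with rfl | hc
      · intro hm
        rcases List.mem_cons.mp hm with rfl | hm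
        · exact hne rfl
        · exact absurd (hy_all _ hm) (not_lt.mpr hlt.le)
      · exact h c hc
    · intro h c hc
      exact h c (List.mem_cons_of_mem _ hc)
  | case5 x xs y ys hne hnlt ih =>
    have hylt : y < x := lt_of_le_of_ne (not_lt.mp hnlt) (fun h => hne h.symm)
    have hx_all : ∀ z ∈ xs, x < z := (List.pairwise_cons.mp hxs).1
    rw [ih hxs (List.pairwise_cons.mp hys).2]
    constructor
    · intro h c hc hm
      rcases List.mem_cons.mp hm with rfl | hm
      · rcases List.mem_cons.mp hc with rfl | hc
        · exact hne rfl
        · exact absurd (hx_all _ hc) (not_lt.mpr hylt.le)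
      · exact h c hc hm
    · intro h c hc hm
      exact h c hc (List.mem_cons_of_mem _ hm)

theorem check_symbol_alt_true_iff (s : String) :
    check_symbol_alt s = true ↔ ∀ c ∈ s.toList, c ∉ pvSpecialChars := by
  unfold check_symbol_alt
  rw [pvNoCommon_true_iff _ _ (PySem.List.sorted_ofList_pairwise_lt _)
        (PySem.List.sorted_ofList_pairwise_lt _)]
  constructor
  · intro h c hc hm
    exact h c (by rw [PySem.List.mem_sorted, PySem.Set.mem_ofList]; exact hc)
      (by rw [PySem.List.mem_sorted, PySem.Set.mem_ofList]; exact hm)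
  · intro h c hc hm
    rw [PySem.List.mem_sorted, PySem.Set.mem_ofList] at hc hm
    exact h c hc hm

-- ===== VERDICT (by name: the statement is the Claim_ definition above) =====
theorem check_symbol_spec : Claim_equal_check_symbol := by
  intro s _
  unfold Spec_check_symbol
  rcases ha : check_symbol s with _ | _
  · rcases hb : check_symbol_alt s with _ | _
    · rfl
    · have hA := (check_symbol_true_iff s).mpr ((check_symbol_alt_true_iff s).mp hb)
      exact absurd hA (by simp [ha])
  · exact ((check_symbol_alt_true_iff s).mpr ((check_symbol_true_iff s).mp ha)).symm
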